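-- pv_equiv track=rewrite | github.com/frank1010111/petrelpy | wellconnection.py | get_well
-- ===== SOURCE A (Python) =====
-- def get_well(file_obj):
--     in_well = False
--     strings = ''
--     for row in file_obj:
--         if row.startswith('WELLNAME'):
--             in_well = True
--             strings += row
--         elif row.startswith('END_TRAJECTORY') and in_well:
--             in_well = False
--             strings += row
--             out_string = strings
--             strings = ''
--             yield out_string
--         elif in_well:
--             strings += row
-- ===== SOURCE B (Python) =====
-- def get_well(file_obj):
--     it = iter(file_obj)
--     for row in it:
--         if row.startswith('WELLNAME'):
--             block = row
--             for nxt in it: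
--                 block += nxt
--                 if nxt.startswith('END_TRAJECTORY'):
--                     yield block
--                     break
-- ===== Notes on version B (the rewrite author's own statement) =====
-- stated objective: alternative
-- what changed: Replaces A's single flat loop with an in_well flag and a reset string accumulator by nested iteration over one shared iterator: an outer loop finds WELLNAME headers and an inner loop consumes rows up to END_TRAJECTORY, so the boolean state disappears.
import Mathlib
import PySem

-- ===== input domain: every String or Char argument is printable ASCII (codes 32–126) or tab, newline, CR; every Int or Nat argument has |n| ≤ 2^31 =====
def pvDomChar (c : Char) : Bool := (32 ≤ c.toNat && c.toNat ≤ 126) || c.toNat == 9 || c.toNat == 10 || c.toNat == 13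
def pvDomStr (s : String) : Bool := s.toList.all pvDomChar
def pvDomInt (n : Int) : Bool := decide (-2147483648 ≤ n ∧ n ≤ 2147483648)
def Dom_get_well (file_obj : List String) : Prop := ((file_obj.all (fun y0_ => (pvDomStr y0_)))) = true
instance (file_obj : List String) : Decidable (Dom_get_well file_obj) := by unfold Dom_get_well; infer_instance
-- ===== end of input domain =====

-- B replaces A's flat loop + in_well flag by nested iteration over one shared iterator (alternative decomposition, same cost).

-- ===== PORT A =====
-- state: (in_well, strings, yielded so far)
def getWellStep (st : Bool × String × List String) (row : String) : Bool × String × List String :=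
  if PySem.Str.startswith row "WELLNAME" then (true, st.2.1 ++ row, st.2.2)
  else if PySem.Str.startswith row "END_TRAJECTORY" && st.1 then
    (false, "", st.2.2 ++ [st.2.1 ++ row])
  else if st.1 then (st.1, st.2.1 ++ row, st.2.2)
  else st

def get_well (file_obj : List String) : List String :=
  (file_obj.foldl getWellStep (false, "", [])).2.2

-- ===== PORT B =====
mutual
-- the outer `for row in it:` loop, scanning for a WELLNAME header
def getWellOuter : List String → List String
  | [] => []
  | row :: rest =>
    if PySem.Str.startswith row "WELLNAME" then getWellInner rest row
    else getWellOuter rest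
-- the inner `for nxt in it:` loop, accumulating the block until END_TRAJECTORY
def getWellInner : List String → String → List String
  | [], _ => []
  | nxt :: rest, block =>
    if PySem.Str.startswith nxt "END_TRAJECTORY" then
      (block ++ nxt) :: getWellOuter rest
    else getWellInner rest (block ++ nxt)
end

def get_well_alt (file_obj : List String) : List String := getWellOuter file_obj

-- ===== PRECONDITION & SPEC =====
def Spec_get_well (file_obj : List String) (out : List String) : Prop := out = get_well_alt file_obj
instance (file_obj : List String) (out : List String) : Decidable (Spec_get_well file_obj out) := by unfold Spec_get_well; infer_instance

-- ===== CLAIM (what is proved, stated in full; the proofs are below) =====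
def Claim_equal_get_well : Prop := ∀ (file_obj : List String), Dom_get_well file_obj → Spec_get_well file_obj (get_well file_obj)

-- ===== LEMMAS AND PROOFS =====
theorem wellname_not_end (cs : List Char)
    (h : PySem.Chars.startswith cs "WELLNAME".toList = true) :
    PySem.Chars.startswith cs "END_TRAJECTORY".toList = false := by
  rw [PySem.Chars.startswith_iff] at h
  by_contra hc
  simp only [Bool.not_eq_false, PySem.Chars.startswith_iff] at hc
  obtain ⟨t1, h1⟩ := h
  obtain ⟨t2, h2⟩ := hc
  have := h1.trans h2.symm
  simp at this

theorem getWell_loops (l : List String) :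
    (∀ acc, (l.foldl getWellStep (false, "", acc)).2.2 = acc ++ getWellOuter l) ∧
    (∀ acc blk, (l.foldl getWellStep (true, blk, acc)).2.2 = acc ++ getWellInner l blk) := by
  induction l with
  | nil => simp [getWellOuter, getWellInner]
  | cons row rest ih =>
    constructor
    · intro acc
      simp only [List.foldl_cons, getWellStep, getWellOuter, PySem.Str.startswith_eq]
      by_cases hW : PySem.Chars.startswith row.toList "WELLNAME".toList = true
      · simp only [hW]
        simp [ih.2, String.empty_append]
      · simp only [hW]
        simp [ih.1]
    · intro acc blk
      simp only [List.foldl_cons, getWellStep, getWellInner, PySem.Str.startswith_eq]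
      by_cases hW : PySem.Chars.startswith row.toList "WELLNAME".toList = true
      · simp only [hW, wellname_not_end row.toList hW]
        simp [ih.2]
      · by_cases hE : PySem.Chars.startswith row.toList "END_TRAJECTORY".toList = true
        · simp only [hW, hE]
          simp [ih.1]
        · simp only [hW, hE]
          simp [ih.2]

-- ===== VERDICT (by name: the statement is the Claim_ definition above) =====
theorem get_well_spec : Claim_equal_get_well := by
  intro file_obj _
  unfold Spec_get_well get_well get_well_alt
  simpa using (getWell_loops file_obj).1 []
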